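-- pv_equiv track=rewrite | github.com/goldenstein64/DailyInterviewPro | solutions/_2025/_09_september/_08_list_bonuses.py | get_bonuses
-- ===== SOURCE A (Python) =====
-- def get_bonuses(performance: list[int]) -> list[int]:
--     result: list[int] = [1] * len(performance)
--     for i in range(len(performance) - 1):
--         [first, second] = performance[i : i + 2]
--         if first > second:
--             result[i] += 1
--         elif first < second:
--             result[i + 1] += 1
--
--     return result
-- ===== SOURCE B (Python) =====
-- def get_bonuses(performance: list[int]) -> list[int]:
--     n = len(performance)
--     return [
--         1
--         + (1 if i > 0 and performance[i] > performance[i - 1] else 0)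
--         + (1 if i < n - 1 and performance[i] > performance[i + 1] else 0)
--         for i in range(n)
--     ]
-- ===== Notes on version B (the rewrite author's own statement) =====
-- stated objective: simpler
-- what changed: Replaces the pair-by-pair loop that mutates two cells of a pre-filled array with a single list comprehension computing each element's bonus directly from its two neighbors.
import Mathlib
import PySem

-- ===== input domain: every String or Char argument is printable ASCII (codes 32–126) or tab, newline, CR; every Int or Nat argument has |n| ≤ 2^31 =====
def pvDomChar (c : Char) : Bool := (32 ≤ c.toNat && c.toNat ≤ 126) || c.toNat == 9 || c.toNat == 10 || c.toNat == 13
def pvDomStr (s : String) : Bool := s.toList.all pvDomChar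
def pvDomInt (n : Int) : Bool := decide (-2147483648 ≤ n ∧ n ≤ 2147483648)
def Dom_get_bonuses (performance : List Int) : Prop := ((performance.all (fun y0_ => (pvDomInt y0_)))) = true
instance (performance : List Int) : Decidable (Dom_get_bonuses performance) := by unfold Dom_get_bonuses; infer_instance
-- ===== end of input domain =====

-- B replaces A's pair-by-pair mutation loop with a per-element comprehension reading both
-- neighbors; objective: simpler.

-- ===== PORT A =====
-- literal port of A: result = [1]*n; for i in range(n-1): destructure performance[i:i+2],
-- bump result[i] or result[i+1].  The '| _ => result' arm is Python's unreachable
-- destructuring-failure case (the slice always has exactly 2 elements here).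
def get_bonuses (performance : List Int) : List Int :=
  let result : List Int := List.replicate performance.length 1
  (PySem.List.pyRange 0 ((performance.length : Int) - 1) 1).foldl
    (fun result i =>
      match PySem.List.slice performance (some i) (some (i + 2)) with
      | [first, second] =>
        if first > second then
          PySem.List.pySetD result i (PySem.List.pyGetD result i 0 + 1)
        else if first < second then
          PySem.List.pySetD result (i + 1) (PySem.List.pyGetD result (i + 1) 0 + 1)
        else result
      | _ => result)
    result

-- ===== PORT B =====
-- literal port of Source B: one comprehension over range(n), guarded neighbor reads.
def get_bonuses_alt (performance : List Int) : List Int :=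
  let n : Int := performance.length
  (PySem.List.pyRange 0 n 1).map (fun i =>
    1 + (if 0 < i ∧ PySem.List.pyGetD performance i 0 > PySem.List.pyGetD performance (i - 1) 0 then 1 else 0)
      + (if i < n - 1 ∧ PySem.List.pyGetD performance i 0 > PySem.List.pyGetD performance (i + 1) 0 then 1 else 0))

-- ===== PRECONDITION & SPEC =====
def Spec_get_bonuses (performance : List Int) (out : List Int) : Prop := out = get_bonuses_alt performance
instance (performance : List Int) (out : List Int) : Decidable (Spec_get_bonuses performance out) := by unfold Spec_get_bonuses; infer_instance

-- ===== CLAIM (what is proved, stated in full; the proofs are below) =====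
def Claim_equal_get_bonuses : Prop := ∀ (performance : List Int), Dom_get_bonuses performance → Spec_get_bonuses performance (get_bonuses performance)

-- ===== LEMMAS AND PROOFS =====

-- bonus from the previous element (prev) and from the next element (head of q)
def pvPrevT (prev : Option Int) (a : Int) : Int :=
  match prev with | some v => if a > v then 1 else 0 | none => 0

def pvNextT (a : Int) (q : List Int) : Int :=
  match q with | [] => 0 | b :: _ => if a > b then 1 else 0

-- common structural specification both ports are reduced to
def pvSpec (prev : Option Int) : List Int → List Int
  | [] => []
  | a :: q => (1 + pvPrevT prev a + pvNextT a q) :: pvSpec (some a) q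

-- A's loop body at Nat index k
def pvStepN (p : List Int) (r : List Int) (k : Nat) : List Int :=
  match (p.drop k).take 2 with
  | [first, second] =>
    if first > second then r.set k (r.getD k 0 + 1)
    else if first < second then r.set (k + 1) (r.getD (k + 1) 0 + 1)
    else r
  | _ => r

lemma pvStep_eq (p r : List Int) (k : Nat) :
    (fun (result : List Int) (i : Int) =>
      match PySem.List.slice p (some i) (some (i + 2)) with
      | [first, second] =>
        if first > second then
          PySem.List.pySetD result i (PySem.List.pyGetD result i 0 + 1)
        else if first < second then
          PySem.List.pySetD result (i + 1) (PySem.List.pyGetD result (i + 1) 0 + 1)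
        else result
      | _ => result) r ((k : Int)) = pvStepN p r k := by
  have h2 : ((k : Int) + 2) = ((k + 2 : Nat) : Int) := by push_cast; ring
  have h1 : ((k : Int) + 1) = ((k + 1 : Nat) : Int) := by push_cast; ring
  simp only [h2, h1, PySem.List.slice_natCast, PySem.List.pySetD_natCast,
    PySem.List.pyGetD_natCast, pvStepN, Nat.add_sub_cancel_left]

lemma pvShift (l : List Nat) (p : List Int) (a h : Int) (r : List Int) :
    (l.map Nat.succ).foldl (pvStepN (a :: p)) (h :: r) = h :: l.foldl (pvStepN p) r := by
  induction l generalizing r with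
  | nil => simp
  | cons k t ih =>
    have hstep : pvStepN (a :: p) (h :: r) (Nat.succ k) = h :: pvStepN p r k := by
      unfold pvStepN
      simp only [Nat.succ_eq_add_one, List.drop_succ_cons]
      rcases List.take 2 (List.drop k p) with _ | ⟨f, _ | ⟨s, _ | ⟨y, rest⟩⟩⟩
      · rfl
      · rfl
      · simp only [List.set_cons_succ, List.getD_cons_succ]
        split_ifs <;> rfl
      · rfl
    simp only [List.map_cons, List.foldl_cons, hstep, ih]

lemma pvFoldA (q : List Int) (a x : Int) :
    (List.range q.length).foldl (pvStepN (a :: q)) (x :: List.replicate q.length 1)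
      = (x + pvNextT a q) :: pvSpec (some a) q := by
  induction q generalizing a x with
  | nil => simp [pvSpec, pvNextT]
  | cons b t ih =>
    have hr : List.range (b :: t).length = 0 :: (List.range t.length).map Nat.succ := by
      simp [List.range_succ_eq_map]
    have hrep : List.replicate (b :: t).length (1 : Int) = 1 :: List.replicate t.length 1 := rfl
    have hstep0 : pvStepN (a :: b :: t) (x :: 1 :: List.replicate t.length 1) 0
        = (x + (if a > b then 1 else 0)) :: ((1 + (if b > a then 1 else 0)) :: List.replicate t.length 1) := by
      unfold pvStepN
      simp only [List.drop_zero, List.take_succ_cons, List.take_zero]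
      split_ifs with hgt hlt <;> simp_all
      try omega
    rw [hr, hrep]
    simp only [List.foldl_cons, hstep0]
    rw [pvShift, ih]
    simp [pvSpec, pvNextT, pvPrevT, add_assoc]

lemma pvA_eq_spec (p : List Int) : get_bonuses p = pvSpec none p := by
  cases p with
  | nil => simp [get_bonuses, pvSpec, PySem.List.pyRange]
  | cons a q =>
    unfold get_bonuses
    have hn : ((a :: q).length : Int) - 1 = (q.length : Int) := by simp
    rw [hn, PySem.List.pyRange_one, List.foldl_map]
    have hfun : (fun (result : List Int) (k : Nat) =>
        (fun (result : List Int) (i : Int) =>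
          match PySem.List.slice (a :: q) (some i) (some (i + 2)) with
          | [first, second] =>
            if first > second then
              PySem.List.pySetD result i (PySem.List.pyGetD result i 0 + 1)
            else if first < second then
              PySem.List.pySetD result (i + 1) (PySem.List.pyGetD result (i + 1) 0 + 1)
            else result
          | _ => result) result ((0 : Int) + (k : Nat)))
        = pvStepN (a :: q) := by
      funext r k
      rw [show ((0 : Int) + (k : Nat)) = ((k : Nat) : Int) by ring]
      exact pvStep_eq (a :: q) r k
    simp only [Int.sub_zero, Int.toNat_natCast, hfun]
    have : (a :: q).length = q.length + 1 := rfl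
    rw [this, List.replicate_succ]
    rw [pvFoldA q a 1]
    simp [pvSpec, pvPrevT]

-- per-element value of B at Nat index k (after casts are removed)
def pvG (p : List Int) (k : Nat) : Int :=
  1 + (if 0 < k ∧ p.getD k 0 > p.getD (k - 1) 0 then 1 else 0)
    + (if k + 1 < p.length ∧ p.getD k 0 > p.getD (k + 1) 0 then 1 else 0)

lemma pvAlt_map (p : List Int) : get_bonuses_alt p = (List.range p.length).map (pvG p) := by
  have hz : get_bonuses_alt p = (PySem.List.pyRange 0 (p.length : Int) 1).map (fun i =>
      1 + (if 0 < i ∧ PySem.List.pyGetD p i 0 > PySem.List.pyGetD p (i - 1) 0 then 1 else 0)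
        + (if i < (p.length : Int) - 1 ∧ PySem.List.pyGetD p i 0 > PySem.List.pyGetD p (i + 1) 0 then 1 else 0)) := rfl
  rw [hz, PySem.List.pyRange_one, List.map_map]
  simp only [Int.sub_zero, Int.toNat_natCast]
  apply List.map_congr_left
  intro k hk
  rw [List.mem_range] at hk
  simp only [Function.comp, zero_add]
  unfold pvG
  have h2 : ((k : Int) + 1) = ((k + 1 : Nat) : Int) := by push_cast; ring
  have h3 : ((k : Int) < (p.length : Int) - 1) ↔ (k + 1 < p.length) := by omega
  congr 1
  · congr 1
    rcases Nat.eq_zero_or_pos k with h0 | h0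
    · subst h0
      simp
    · have h1 : ((k : Int) - 1) = ((k - 1 : Nat) : Int) := by omega
      rw [h1]
      simp only [PySem.List.pyGetD_natCast]
      apply if_congr _ rfl rfl
      exact and_congr Int.natCast_pos Iff.rfl
  · rw [h2]
    simp only [PySem.List.pyGetD_natCast]
    apply if_congr _ rfl rfl
    exact and_congr h3 Iff.rfl

lemma pvMapG (q : List Int) (a : Int) :
    (List.range q.length).map (fun k => pvG (a :: q) (k + 1)) = pvSpec (some a) q := by
  induction q generalizing a with
  | nil => simp [pvSpec]
  | cons b t ih =>
    have hr : List.range (b :: t).length = 0 :: (List.range t.length).map Nat.succ := by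
      simp [List.range_succ_eq_map]
    rw [hr]
    simp only [List.map_cons, List.map_map]
    have hhead : pvG (a :: b :: t) 1 = 1 + pvPrevT (some a) b + pvNextT b t := by
      unfold pvG pvPrevT pvNextT
      cases t with
      | nil => simp
      | cons c t' =>
        simp only [List.getD_cons_succ, List.getD_cons_zero, List.length_cons]
        have hlen : 1 + 1 < t'.length + 1 + 1 + 1 := by omega
        simp [hlen]
    have htail : (List.range t.length).map ((fun k => pvG (a :: b :: t) (k + 1)) ∘ Nat.succ)
        = pvSpec (some b) t := by
      rw [← ih b]
      apply List.map_congr_left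
      intro k _
      simp only [Function.comp, Nat.succ_eq_add_one]
      unfold pvG
      simp only [List.getD_cons_succ, List.length_cons, Nat.add_sub_cancel]
      have hlen : (k + 1 + 1 + 1 < t.length + 1 + 1) ↔ (k + 1 + 1 < t.length + 1) := by omega
      simp [hlen]
    rw [hhead, htail]
    rfl

lemma pvAlt_eq_spec (p : List Int) : get_bonuses_alt p = pvSpec none p := by
  rw [pvAlt_map]
  cases p with
  | nil => simp [pvSpec]
  | cons a q =>
    have hr : List.range (a :: q).length = 0 :: (List.range q.length).map Nat.succ := by
      simp [List.range_succ_eq_map]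
    rw [hr]
    simp only [List.map_cons, List.map_map]
    have hhead : pvG (a :: q) 0 = 1 + pvPrevT none a + pvNextT a q := by
      unfold pvG pvPrevT pvNextT
      cases q <;> simp
    have htail : (List.range q.length).map (pvG (a :: q) ∘ Nat.succ) = pvSpec (some a) q := by
      rw [← pvMapG q a]
      apply List.map_congr_left
      intro k _
      simp [Function.comp, Nat.succ_eq_add_one]
    rw [hhead, htail]
    rfl

-- ===== VERDICT (by name: the statement is the Claim_ definition above) =====
theorem get_bonuses_spec : Claim_equal_get_bonuses := by
  intro p _
  unfold Spec_get_bonuses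
  rw [pvA_eq_spec, pvAlt_eq_spec]
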